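-- pv_equiv track=rewrite | github.com/jeswr/compact-representations | minimal.py | has_pattern
-- ===== SOURCE A (Python) =====
-- RANGES = 12
--
-- def encode_triple(triple):
--   s, p, o = triple
--   return s + p * RANGES + o * RANGES ** 2
--
-- def has_pattern(graph, pattern):
--   s, p, o = pattern
--     # Create a mask with 1s at all positions that match the pattern
--   mask = 0
--
--   # Generate all possible triples that match the pattern
--   s_values = [s] if s is not None else range(RANGES)
--   p_values = [p] if p is not None else range(RANGES)
--   o_values = [o] if o is not None else range(RANGES)
--
--   # Set bits in mask for all matching positions
--   for s_val in s_values: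
--     for p_val in p_values:
--       for o_val in o_values:
--         mask |= (1 << encode_triple((s_val, p_val, o_val)))
--
--   # Check if any matching position has a bit set in the graph
--   return (graph & mask) != 0
-- ===== SOURCE B (Python) =====
-- RANGES = 12
--
-- def has_pattern(graph, pattern):
--   s, p, o = pattern
--   # Offset contributed by the fixed coordinates; wildcards contribute a "spread" factor.
--   base = (s if s is not None else 0) + (p if p is not None else 0) * RANGES + (o if o is not None else 0) * RANGES ** 2
--   mask = 1 << base
--   if s is None:
--     mask *= sum(1 << v for v in range(RANGES))
--   if p is None:
--     mask *= sum(1 << RANGES * v for v in range(RANGES))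
--   if o is None:
--     mask *= sum(1 << RANGES ** 2 * v for v in range(RANGES))
--   return (graph & mask) != 0
-- ===== Notes on version B (the rewrite author's own statement) =====
-- stated objective: faster
-- what changed: B replaces A's O(RANGES^3) triple nested loop of shift-OR mask accumulation by a closed-form product: 2^base for the fixed coordinates times one constant per-coordinate 'spread' factor per wildcard; the three coordinate bit-groups are disjoint, so the carry-free product equals A's OR-accumulated mask.
import Mathlib
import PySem

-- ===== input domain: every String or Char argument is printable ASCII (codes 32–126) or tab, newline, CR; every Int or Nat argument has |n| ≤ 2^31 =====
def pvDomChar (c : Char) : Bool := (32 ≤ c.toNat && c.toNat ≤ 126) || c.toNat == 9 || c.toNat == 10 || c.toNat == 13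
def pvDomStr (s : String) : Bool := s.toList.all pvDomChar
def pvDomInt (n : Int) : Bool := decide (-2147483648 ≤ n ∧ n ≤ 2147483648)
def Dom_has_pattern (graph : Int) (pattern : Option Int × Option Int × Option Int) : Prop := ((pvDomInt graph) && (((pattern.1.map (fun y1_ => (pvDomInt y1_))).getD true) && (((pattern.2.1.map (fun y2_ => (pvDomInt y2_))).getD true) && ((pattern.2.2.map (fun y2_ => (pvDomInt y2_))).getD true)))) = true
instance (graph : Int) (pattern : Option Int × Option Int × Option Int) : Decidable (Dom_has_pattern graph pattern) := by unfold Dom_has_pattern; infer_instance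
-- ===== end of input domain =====

-- B replaces A's triple nested loop by a closed-form mask (2^base times one constant spread
-- factor per wildcard coordinate); objective: faster (no RANGES^3 inner loop).

-- ===== PORT A =====
-- Python's 'RANGES ** 2' etc. appear literally; RANGES = 12.
-- Python's '1 << e' on an Int e: exact for 0 ≤ e (guaranteed by Pre_); Python raises
-- ValueError for e < 0, and those inputs are excluded by Pre_has_pattern below.
def pyShl1 (e : Int) : Int := (1 : Int) <<< e.toNat

def encode_triple (t : Int × Int × Int) : Int :=
  t.1 + t.2.1 * 12 + t.2.2 * 12 ^ 2

def has_pattern (graph : Int) (pattern : Option Int × Option Int × Option Int) : Bool :=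
  let s := pattern.1
  let p := pattern.2.1
  let o := pattern.2.2
  let s_values : List Int := match s with | some v => [v] | none => PySem.List.pyRange 0 12 1
  let p_values : List Int := match p with | some v => [v] | none => PySem.List.pyRange 0 12 1
  let o_values : List Int := match o with | some v => [v] | none => PySem.List.pyRange 0 12 1
  let mask : Int := s_values.foldl (fun m s_val =>
    p_values.foldl (fun m p_val =>
      o_values.foldl (fun m o_val =>
        PySem.Int.bor m (pyShl1 (encode_triple (s_val, p_val, o_val)))) m) m) 0
  decide (PySem.Int.band graph mask ≠ 0)

-- ===== PORT B =====
def has_pattern_alt (graph : Int) (pattern : Option Int × Option Int × Option Int) : Bool :=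
  let s := pattern.1
  let p := pattern.2.1
  let o := pattern.2.2
  let base : Int := (s.getD 0) + (p.getD 0) * 12 + (o.getD 0) * 12 ^ 2
  let mask0 : Int := pyShl1 base
  let mask1 : Int := if s = none then mask0 * ((PySem.List.pyRange 0 12 1).map (fun v => pyShl1 v)).sum else mask0
  let mask2 : Int := if p = none then mask1 * ((PySem.List.pyRange 0 12 1).map (fun v => pyShl1 (12 * v))).sum else mask1
  let mask3 : Int := if o = none then mask2 * ((PySem.List.pyRange 0 12 1).map (fun v => pyShl1 (12 ^ 2 * v))).sum else mask2
  decide (PySem.Int.band graph mask3 ≠ 0)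

-- ===== PRECONDITION & SPEC =====
-- Pre_ excludes exactly the inputs where the Python A raises ValueError (negative shift
-- count): patterns whose fixed coordinates encode to a negative base exponent. B raises there too.
def Pre_has_pattern (graph : Int) (pattern : Option Int × Option Int × Option Int) : Prop :=
  0 ≤ pattern.1.getD 0 + pattern.2.1.getD 0 * 12 + pattern.2.2.getD 0 * 12 ^ 2

instance (graph : Int) (pattern : Option Int × Option Int × Option Int) : Decidable (Pre_has_pattern graph pattern) := by unfold Pre_has_pattern; infer_instance

def pvWitness_has_pattern : Int × (Option Int × Option Int × Option Int) := (5, (some 2, none, some 0))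

def Spec_has_pattern (graph : Int) (pattern : Option Int × Option Int × Option Int) (out : Bool) : Prop := out = has_pattern_alt graph pattern
instance (graph : Int) (pattern : Option Int × Option Int × Option Int) (out : Bool) : Decidable (Spec_has_pattern graph pattern out) := by unfold Spec_has_pattern; infer_instance

-- ===== CLAIM (what is proved, stated in full; the proofs are below) =====
def Claim_equal_has_pattern : Prop := ∀ (graph : Int) (pattern : Option Int × Option Int × Option Int), Dom_has_pattern graph pattern → Pre_has_pattern graph pattern → Spec_has_pattern graph pattern (has_pattern graph pattern)

-- ===== LEMMAS AND PROOFS =====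

theorem lorTwoPow (m e : Nat) (h : m.testBit e = false) : m ||| 2 ^ e = m + 2 ^ e := by
  have hpe : (0:Nat) < 2 ^ e := Nat.two_pow_pos e
  have hpow : (2:Nat) ^ (e+1) = 2 ^ e * 2 := by ring
  have hm : 2 ^ (e+1) * (m / 2 ^ (e+1)) + m % 2 ^ (e+1) = m := Nat.div_add_mod m _
  have hr2 : m % 2 ^ (e+1) < 2 ^ (e+1) := Nat.mod_lt _ (Nat.two_pow_pos _)
  have hb : m / 2 ^ e % 2 = 0 := by
    rw [Nat.testBit_eq_decide_div_mod_eq] at h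
    have := Nat.mod_lt (m / 2 ^ e) (show 0 < 2 by norm_num)
    simp at h
    omega
  have hre : m % 2 ^ (e+1) < 2 ^ e := by
    have h1 : m % (2 ^ e * 2) / 2 ^ e = m / 2 ^ e % 2 := Nat.mod_mul_right_div_self m (2^e) 2
    rw [hpow, hb] at *
    rcases (Nat.div_eq_zero_iff).mp h1 with h' | h'
    · omega
    · exact h'
  have hor : (2:Nat) ^ e ||| m % 2 ^ (e+1) = 2 ^ e + m % 2 ^ (e+1) := by
    have h2 := (Nat.two_pow_add_eq_or_of_lt hre 1).symm
    simpa using h2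
  calc m ||| 2 ^ e
      = (2 ^ (e+1) * (m / 2 ^ (e+1)) ||| m % 2 ^ (e+1)) ||| 2 ^ e := by
        rw [← Nat.two_pow_add_eq_or_of_lt hr2, hm]
    _ = 2 ^ (e+1) * (m / 2 ^ (e+1)) ||| (2 ^ e + m % 2 ^ (e+1)) := by
        rw [Nat.or_assoc, Nat.or_comm (m % 2 ^ (e+1)), hor]
    _ = 2 ^ (e+1) * (m / 2 ^ (e+1)) + (2 ^ e + m % 2 ^ (e+1)) := by
        rw [← Nat.two_pow_add_eq_or_of_lt (show 2 ^ e + m % 2 ^ (e+1) < 2 ^ (e+1) by omega)]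
    _ = m + 2 ^ e := by omega

theorem orFoldl {α : Type} (e : α → Nat) (l : List α) : ∀ (acc : Nat),
    (l.map e).Nodup → (∀ x ∈ l, acc.testBit (e x) = false) →
    l.foldl (fun m x => m ||| 2 ^ e x) acc = acc + (l.map (fun x => 2 ^ e x)).sum := by
  induction l with
  | nil => intro acc _ _; simp
  | cons x xs ih =>
    intro acc hnd hbit
    simp only [List.map_cons, List.nodup_cons, List.mem_map] at hnd
    have hx : acc ||| 2 ^ e x = acc + 2 ^ e x :=
      lorTwoPow _ _ (hbit x (List.mem_cons_self))
    have hstep : ∀ y ∈ xs, (acc ||| 2 ^ e x).testBit (e y) = false := by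
      intro y hy
      rw [Nat.testBit_or, hbit y (List.mem_cons_of_mem _ hy), Nat.testBit_two_pow]
      simp only [Bool.false_or, decide_eq_false_iff_not]
      intro hEq
      exact hnd.1 ⟨y, hy, hEq.symm⟩
    rw [List.foldl_cons, ih _ hnd.2 hstep, hx]
    simp [List.map_cons, List.sum_cons]
    omega

theorem foldlTriple (l1 l2 l3 : List Int) (g : Int → Int × Int × Int → Int) (init : Int) :
    l1.foldl (fun m a => l2.foldl (fun m b => l3.foldl (fun m c => g m (a, b, c)) m) m) init =
    (l1.flatMap (fun a => l2.flatMap (fun b => l3.map (fun c => (a, b, c))))).foldl g init := by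
  simp [List.foldl_flatMap, List.foldl_map]

theorem pyShl1_eq (e : Int) : pyShl1 e = ((2 ^ e.toNat : Nat) : Int) := by
  simp [pyShl1, Int.shiftLeft_eq]

theorem castFold' {α : Type} (f : α → Int) (l : List α) (n : Nat) :
    l.foldl (fun (m : Int) x => PySem.Int.bor m (pyShl1 (f x))) (n : Int)
      = ((l.foldl (fun m x => m ||| 2 ^ (f x).toNat) n : Nat) : Int) := by
  induction l generalizing n with
  | nil => simp
  | cons x xs ih =>
    rw [List.foldl_cons, List.foldl_cons, pyShl1_eq, PySem.Int.bor_natCast, ih]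



theorem sumMulTwo (dP dO : List Nat) (g h : Nat → Nat) :
    ((dP.flatMap (fun d2 => dO.map (fun d3 => g d2 * h d3))).sum)
      = (dP.map g).sum * (dO.map h).sum := by
  induction dP with
  | nil => simp
  | cons d2 rest ih =>
    simp [List.flatMap_cons, List.sum_append, ih, Nat.add_mul, List.sum_map_mul_left]

theorem sumMulThree (dS dP dO : List Nat) (C : Nat) (f g h : Nat → Nat) :
    ((dS.flatMap (fun d1 => dP.flatMap (fun d2 => dO.map (fun d3 => C * f d1 * g d2 * h d3)))).sum)
      = C * ((dS.map f).sum * ((dP.map g).sum * (dO.map h).sum)) := by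
  induction dS with
  | nil => simp
  | cons d1 rest ih =>
    rw [List.flatMap_cons, List.sum_append, ih,
      sumMulTwo dP dO (fun d2 => C * f d1 * g d2) h, List.sum_map_mul_left]
    simp only [List.map_cons, List.sum_cons]
    ring

theorem nodupE (Bn : Nat) (dS dP dO : List Nat)
    (hndS : dS.Nodup) (hndP : dP.Nodup) (hndO : dO.Nodup)
    (hbS : ∀ d ∈ dS, d < 12) (hbP : ∀ d ∈ dP, d < 12) :
    (dS.flatMap (fun d1 => dP.flatMap (fun d2 =>
      dO.map (fun d3 => Bn + (d1 + 12 * d2 + 144 * d3))))).Nodup := by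
  rw [List.nodup_flatMap]
  refine ⟨?_, ?_⟩
  · intro d1 hd1
    rw [List.nodup_flatMap]
    refine ⟨?_, ?_⟩
    · intro d2 hd2
      exact List.Nodup.map (fun x y hxy => by omega) hndO
    · refine List.Pairwise.imp_of_mem ?_ hndP
      intro d2 d2' hd2 hd2' hne
      intro x hx hx'
      simp only [List.mem_map] at hx hx'
      obtain ⟨d3, _, h1⟩ := hx
      obtain ⟨d3', _, h2⟩ := hx'
      have b2 := hbP d2 hd2
      have b2' := hbP d2' hd2'
      omega
  · refine List.Pairwise.imp_of_mem ?_ hndS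
    intro d1 d1' hd1 hd1' hne
    intro x hx hx'
    simp only [List.mem_flatMap, List.mem_map] at hx hx'
    obtain ⟨d2, hd2, d3, _, h1⟩ := hx
    obtain ⟨d2', hd2', d3', _, h2⟩ := hx'
    have b1 := hbS d1 hd1
    have b1' := hbS d1' hd1'
    have b2 := hbP d2 hd2
    have b2' := hbP d2' hd2'
    omega

theorem main3 (a b c : Int) (dS dP dO : List Nat)
    (hb : 0 ≤ a + b * 12 + c * 12 ^ 2)
    (hndS : dS.Nodup) (hndP : dP.Nodup) (hndO : dO.Nodup)
    (hbS : ∀ d ∈ dS, d < 12) (hbP : ∀ d ∈ dP, d < 12) :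
    ((dS.map (fun (d : Nat) => a + (d : Int))).foldl (fun m s_val =>
      (dP.map (fun (d : Nat) => b + (d : Int))).foldl (fun m p_val =>
        (dO.map (fun (d : Nat) => c + (d : Int))).foldl (fun m o_val =>
          PySem.Int.bor m (pyShl1 (encode_triple (s_val, p_val, o_val)))) m) m) 0 : Int)
    = ((2 ^ (a + b * 12 + c * 12 ^ 2).toNat *
        ((dS.map (fun d => 2 ^ d)).sum *
         ((dP.map (fun d => 2 ^ (12 * d))).sum * (dO.map (fun d => 2 ^ (144 * d))).sum)) : Nat) : Int) := by
  rw [foldlTriple (dS.map (fun (d : Nat) => a + (d : Int))) (dP.map (fun (d : Nat) => b + (d : Int)))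
      (dO.map (fun (d : Nat) => c + (d : Int)))
      (fun m t => PySem.Int.bor m (pyShl1 (encode_triple t))) 0]
  have hc := castFold' encode_triple
      ((dS.map (fun (d : Nat) => a + (d : Int))).flatMap (fun a' =>
        (dP.map (fun (d : Nat) => b + (d : Int))).flatMap (fun b' =>
          (dO.map (fun (d : Nat) => c + (d : Int))).map (fun c' => (a', b', c'))))) 0
  rw [Nat.cast_zero] at hc
  rw [hc]
  congr 1
  rw [← List.foldl_map (f := fun t => (encode_triple t).toNat) (g := fun (m : Nat) d => m ||| 2 ^ d)]
  have hE : (((dS.map (fun (d : Nat) => a + (d : Int))).flatMap (fun a' =>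
        (dP.map (fun (d : Nat) => b + (d : Int))).flatMap (fun b' =>
          (dO.map (fun (d : Nat) => c + (d : Int))).map (fun c' => (a', b', c'))))).map
            (fun t => (encode_triple t).toNat))
      = dS.flatMap (fun d1 => dP.flatMap (fun d2 =>
          dO.map (fun d3 => (a + b * 12 + c * 12 ^ 2).toNat + (d1 + 12 * d2 + 144 * d3)))) := by
    simp only [List.map_flatMap, List.flatMap_map, List.map_map]
    congr 1
    funext d1
    congr 1
    funext d2
    congr 1
    funext d3
    have h144 : (12:Int) ^ 2 = 144 := by norm_num
    simp only [encode_triple, h144, Function.comp_apply]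
    rw [h144] at hb
    omega
  rw [hE]
  have hord := orFoldl (fun d => d) (dS.flatMap (fun d1 => dP.flatMap (fun d2 =>
      dO.map (fun d3 => (a + b * 12 + c * 12 ^ 2).toNat + (d1 + 12 * d2 + 144 * d3))))) 0
    (by simpa using nodupE _ dS dP dO hndS hndP hndO hbS hbP)
    (fun x _ => Nat.zero_testBit _)

  rw [hord]
  simp only [Nat.zero_add, List.map_flatMap, List.map_map]
  have hsplit : ∀ d1 d2 d3 : Nat, (2:Nat) ^ ((a + b * 12 + c * 12 ^ 2).toNat + (d1 + 12 * d2 + 144 * d3)) = 2 ^ (a + b * 12 + c * 12 ^ 2).toNat * 2 ^ d1 * 2 ^ (12 * d2) * 2 ^ (144 * d3) := by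
    intro d1 d2 d3
    rw [pow_add, pow_add, pow_add]
    ring
  simp only [Function.comp_def, hsplit]
  rw [sumMulThree]

theorem rangeList : PySem.List.pyRange 0 12 1 = (List.range 12).map (fun (d : Nat) => (0:Int) + (d:Int)) := by
  decide

theorem singList (v : Int) : [v] = ([(0:Nat)] : List Nat).map (fun (d : Nat) => v + (d : Int)) := by
  simp

theorem bandCongr (g m1 m2 : Int) (h : m1 = m2) :
    decide (PySem.Int.band g m1 ≠ 0) = decide (PySem.Int.band g m2 ≠ 0) := by rw [h]

theorem nodupRange12 : (List.range 12).Nodup := List.nodup_range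
theorem boundRange12 : ∀ d ∈ List.range 12, d < 12 := by intro d hd; simpa using hd
theorem nodupSing : ([(0:Nat)] : List Nat).Nodup := by decide
theorem boundSing : ∀ d ∈ ([(0:Nat)] : List Nat), d < 12 := by decide

-- ===== VERDICT (by name: the statement is the Claim_ definition above) =====
theorem has_pattern_spec : Claim_equal_has_pattern := by
  intro graph pattern hdom hpre
  unfold Spec_has_pattern
  obtain ⟨s, p, o⟩ := pattern
  rcases s with _ | a <;> rcases p with _ | b <;> rcases o with _ | c <;>
    simp only [has_pattern, has_pattern_alt, Option.getD_some, Option.getD_none, reduceCtorEq,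
      if_true, if_false]
  · refine bandCongr graph _ _ ?_
    rw [rangeList]
    have hb : 0 ≤ (0:Int) + (0:Int) * 12 + (0:Int) * 12 ^ 2 := by
      simp only [Pre_has_pattern, Option.getD_none] at hpre
      exact hpre
    rw [main3 (0:Int) (0:Int) (0:Int) (List.range 12) (List.range 12) (List.range 12) hb nodupRange12 nodupRange12 nodupRange12 boundRange12 boundRange12]
    rw [pyShl1_eq, Nat.cast_mul]
    have hK : ((((((List.range 12)).map (fun d => 2 ^ d)).sum * ((((List.range 12)).map (fun d => 2 ^ (12 * d))).sum * (((List.range 12)).map (fun d => 2 ^ (144 * d))).sum)) : Nat) : Int) = ((((List.range 12).map (fun (d : Nat) => (0:Int) + (d:Int)))).map (fun v => pyShl1 v)).sum * ((((List.range 12).map (fun (d : Nat) => (0:Int) + (d:Int)))).map (fun v => pyShl1 (12 * v))).sum * ((((List.range 12).map (fun (d : Nat) => (0:Int) + (d:Int)))).map (fun v => pyShl1 (12 ^ 2 * v))).sum := by decide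
    rw [hK]
    ring
  · refine bandCongr graph _ _ ?_
    rw [singList c]
    rw [rangeList]
    have hb : 0 ≤ (0:Int) + (0:Int) * 12 + c * 12 ^ 2 := by
      simp only [Pre_has_pattern, Option.getD_some, Option.getD_none] at hpre
      exact hpre
    rw [main3 (0:Int) (0:Int) c (List.range 12) (List.range 12) [(0:Nat)] hb nodupRange12 nodupRange12 nodupSing boundRange12 boundRange12]
    rw [pyShl1_eq, Nat.cast_mul]
    have hK : ((((((List.range 12)).map (fun d => 2 ^ d)).sum * ((((List.range 12)).map (fun d => 2 ^ (12 * d))).sum * (([(0:Nat)]).map (fun d => 2 ^ (144 * d))).sum)) : Nat) : Int) = ((((List.range 12).map (fun (d : Nat) => (0:Int) + (d:Int)))).map (fun v => pyShl1 v)).sum * ((((List.range 12).map (fun (d : Nat) => (0:Int) + (d:Int)))).map (fun v => pyShl1 (12 * v))).sum := by decide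
    rw [hK]
    ring
  · refine bandCongr graph _ _ ?_
    rw [singList b]
    rw [rangeList]
    have hb : 0 ≤ (0:Int) + b * 12 + (0:Int) * 12 ^ 2 := by
      simp only [Pre_has_pattern, Option.getD_some, Option.getD_none] at hpre
      exact hpre
    rw [main3 (0:Int) b (0:Int) (List.range 12) [(0:Nat)] (List.range 12) hb nodupRange12 nodupSing nodupRange12 boundRange12 boundSing]
    rw [pyShl1_eq, Nat.cast_mul]
    have hK : ((((((List.range 12)).map (fun d => 2 ^ d)).sum * ((([(0:Nat)]).map (fun d => 2 ^ (12 * d))).sum * (((List.range 12)).map (fun d => 2 ^ (144 * d))).sum)) : Nat) : Int) = ((((List.range 12).map (fun (d : Nat) => (0:Int) + (d:Int)))).map (fun v => pyShl1 v)).sum * ((((List.range 12).map (fun (d : Nat) => (0:Int) + (d:Int)))).map (fun v => pyShl1 (12 ^ 2 * v))).sum := by decide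
    rw [hK]
    ring
  · refine bandCongr graph _ _ ?_
    rw [singList b]
    rw [singList c]
    rw [rangeList]
    have hb : 0 ≤ (0:Int) + b * 12 + c * 12 ^ 2 := by
      simp only [Pre_has_pattern, Option.getD_some, Option.getD_none] at hpre
      exact hpre
    rw [main3 (0:Int) b c (List.range 12) [(0:Nat)] [(0:Nat)] hb nodupRange12 nodupSing nodupSing boundRange12 boundSing]
    rw [pyShl1_eq, Nat.cast_mul]
    have hK : ((((((List.range 12)).map (fun d => 2 ^ d)).sum * ((([(0:Nat)]).map (fun d => 2 ^ (12 * d))).sum * (([(0:Nat)]).map (fun d => 2 ^ (144 * d))).sum)) : Nat) : Int) = ((((List.range 12).map (fun (d : Nat) => (0:Int) + (d:Int)))).map (fun v => pyShl1 v)).sum := by decide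
    rw [hK]
  · refine bandCongr graph _ _ ?_
    rw [singList a]
    rw [rangeList]
    have hb : 0 ≤ a + (0:Int) * 12 + (0:Int) * 12 ^ 2 := by
      simp only [Pre_has_pattern, Option.getD_some, Option.getD_none] at hpre
      exact hpre
    rw [main3 a (0:Int) (0:Int) [(0:Nat)] (List.range 12) (List.range 12) hb nodupSing nodupRange12 nodupRange12 boundSing boundRange12]
    rw [pyShl1_eq, Nat.cast_mul]
    have hK : ((((([(0:Nat)]).map (fun d => 2 ^ d)).sum * ((((List.range 12)).map (fun d => 2 ^ (12 * d))).sum * (((List.range 12)).map (fun d => 2 ^ (144 * d))).sum)) : Nat) : Int) = ((((List.range 12).map (fun (d : Nat) => (0:Int) + (d:Int)))).map (fun v => pyShl1 (12 * v))).sum * ((((List.range 12).map (fun (d : Nat) => (0:Int) + (d:Int)))).map (fun v => pyShl1 (12 ^ 2 * v))).sum := by decide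
    rw [hK]
    ring
  · refine bandCongr graph _ _ ?_
    rw [singList a]
    rw [singList c]
    rw [rangeList]
    have hb : 0 ≤ a + (0:Int) * 12 + c * 12 ^ 2 := by
      simp only [Pre_has_pattern, Option.getD_some, Option.getD_none] at hpre
      exact hpre
    rw [main3 a (0:Int) c [(0:Nat)] (List.range 12) [(0:Nat)] hb nodupSing nodupRange12 nodupSing boundSing boundRange12]
    rw [pyShl1_eq, Nat.cast_mul]
    have hK : ((((([(0:Nat)]).map (fun d => 2 ^ d)).sum * ((((List.range 12)).map (fun d => 2 ^ (12 * d))).sum * (([(0:Nat)]).map (fun d => 2 ^ (144 * d))).sum)) : Nat) : Int) = ((((List.range 12).map (fun (d : Nat) => (0:Int) + (d:Int)))).map (fun v => pyShl1 (12 * v))).sum := by decide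
    rw [hK]
  · refine bandCongr graph _ _ ?_
    rw [singList a]
    rw [singList b]
    rw [rangeList]
    have hb : 0 ≤ a + b * 12 + (0:Int) * 12 ^ 2 := by
      simp only [Pre_has_pattern, Option.getD_some, Option.getD_none] at hpre
      exact hpre
    rw [main3 a b (0:Int) [(0:Nat)] [(0:Nat)] (List.range 12) hb nodupSing nodupSing nodupRange12 boundSing boundSing]
    rw [pyShl1_eq, Nat.cast_mul]
    have hK : ((((([(0:Nat)]).map (fun d => 2 ^ d)).sum * ((([(0:Nat)]).map (fun d => 2 ^ (12 * d))).sum * (((List.range 12)).map (fun d => 2 ^ (144 * d))).sum)) : Nat) : Int) = ((((List.range 12).map (fun (d : Nat) => (0:Int) + (d:Int)))).map (fun v => pyShl1 (12 ^ 2 * v))).sum := by decide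
    rw [hK]
  · refine bandCongr graph _ _ ?_
    simp only [List.foldl_cons, List.foldl_nil]
    rw [PySem.Int.bor_comm, PySem.Int.bor_zero]
    simp [encode_triple]
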